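-- pv_equiv track=rewrite | github.com/jramaswami/Binary_Search_Python | fix_flight_itenerary.py | solve
-- ===== SOURCE A (Python) =====
-- from collections import defaultdict
-- from math import inf
--
-- def solve(itinerary, edges):
--     adj = defaultdict(list)
--     for u, v in edges:
--         adj[u].append(v)
--
--     cost = dict()
--     x = itinerary[0]
--     for u in adj:
--         delta = sum(1 if a != b else 0 for a, b in zip(x, u))
--         cost[u] = delta
--
--     new_cost = defaultdict(lambda: inf)
--     for x in itinerary[1:]:
--         for u in adj:
--             for v in adj[u]:
--                 delta = sum(1 if a != b else 0 for a, b in zip(x, v))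
--                 new_cost[v] = min(new_cost[v], cost[u] + delta)
--         cost, new_cost = new_cost, defaultdict(lambda: inf)
--
--     return min(cost.values())
-- ===== SOURCE B (Python) =====
-- from math import inf
--
-- def solve(itinerary, edges):
--     # Backward dynamic programming: walk the itinerary from its last leg to its
--     # first, pulling each node's best continuation from its successor list;
--     # the answer is the best value over the nodes with outgoing edges.
--     succ = {}
--     nodes = set()
--     for u, v in edges:
--         succ.setdefault(u, []).append(v)
--         nodes.add(u)
--         nodes.add(v)
--
--     def ham(x, v):
--         return sum(a != b for a, b in zip(x, v))
--
--     best = {v: ham(itinerary[-1], v) for v in nodes}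
--     for x in reversed(itinerary[:-1]):
--         best = {v: ham(x, v) + min((best[w] for w in succ.get(v, ())), default=inf)
--                 for v in nodes}
--     return min(best[u] for u in succ)
-- ===== Notes on version B (the rewrite author's own statement) =====
-- stated objective: alternative
-- what changed: B replaces A's forward per-edge relaxation (push new_cost[v] over every edge at every step) with a backward dynamic program: it walks the itinerary from the last leg to the first, computing each node's value by pulling the minimum over its successor list, and finally minimises over the nodes with outgoing edges instead of over A's final cost dict.
-- outside the precondition, e.g. on solve(['a', 'a', 'a'], [('a', 'b')]): A returns inf, B returns inf; on solve([], [('a', 'b')]): A raises IndexError, B raises IndexError; on solve(['a'], []): A raises ValueError, B raises ValueError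
import Mathlib
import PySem

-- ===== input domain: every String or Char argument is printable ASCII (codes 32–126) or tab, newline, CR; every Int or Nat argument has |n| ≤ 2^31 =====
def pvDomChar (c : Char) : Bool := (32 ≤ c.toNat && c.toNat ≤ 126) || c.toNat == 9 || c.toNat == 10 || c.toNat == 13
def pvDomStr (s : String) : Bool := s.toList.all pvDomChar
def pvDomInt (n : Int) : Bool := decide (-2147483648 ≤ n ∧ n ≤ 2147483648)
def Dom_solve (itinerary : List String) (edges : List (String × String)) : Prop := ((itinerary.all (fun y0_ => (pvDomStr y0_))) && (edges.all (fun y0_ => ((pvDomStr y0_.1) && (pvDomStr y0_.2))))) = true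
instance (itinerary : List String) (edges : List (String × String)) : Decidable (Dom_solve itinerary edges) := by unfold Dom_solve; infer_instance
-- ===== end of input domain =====

-- B computes the same minimal itinerary-repair cost by backward dynamic programming:
-- it walks the itinerary from its last leg to its first, pulling each node's best
-- continuation from its successor list, instead of A's forward per-edge relaxation.
-- Python's float('inf') (reachable only outside Pre_solve) is ported as `none` in `Option Int`;
-- the encoding is exact for the min/+ arithmetic these programs perform on it.

-- Option Int with none = float('inf'): exact for min and + as used here
def pvOadd : Option Int → Int → Option Int
  | none, _ => none
  | some a, d => some (a + d)

-- d + o with o possibly inf (B adds the node's delta to an optional continuation)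
def pvAddO : Int → Option Int → Option Int
  | _, none => none
  | d, some a => some (d + a)

def pvOmin : Option Int → Option Int → Option Int
  | none, b => b
  | some a, none => some a
  | some a, some b => some (min a b)

-- min(vals) over ints/inf; returns 0 when the Python min would raise (empty) or return inf (both outside Pre_solve)
def pvMinVals (vals : List (Option Int)) : Int :=
  match vals.foldl pvOmin none with
  | some z => z
  | none => 0

-- ===== PORT A =====
-- sum(1 if a != b else 0 for a, b in zip(x, u))
def pvHamA (x u : String) : Int :=
  (List.zip x.toList u.toList).foldl (fun s ab => s + (if ab.1 ≠ ab.2 then (1 : Int) else 0)) 0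

-- adj = defaultdict(list); for u, v in edges: adj[u].append(v)
def pvAdjA (edges : List (String × String)) : PySem.Dict String (List String) :=
  edges.foldl (fun d uv => d.insert uv.1 (d.getD uv.1 [] ++ [uv.2])) PySem.Dict.empty

-- one iteration of A's outer loop body (for u in adj: for v in adj[u]: relax)
def pvStepA (adj : PySem.Dict String (List String)) (cost : PySem.Dict String (Option Int))
    (x : String) : PySem.Dict String (Option Int) :=
  adj.keys.foldl (fun nc u =>
    (adj.getD u []).foldl (fun nc v =>
      nc.insert v (pvOmin (nc.getD v none) (pvOadd (cost.getD u none) (pvHamA x v)))) nc)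
    PySem.Dict.empty

def solve (itinerary : List String) (edges : List (String × String)) : Int :=
  match itinerary with
  | [] => 0  -- itinerary[0] raises IndexError (outside Pre_solve)
  | x0 :: rest =>
    let adj := pvAdjA edges
    let cost0 : PySem.Dict String (Option Int) :=
      adj.keys.foldl (fun c u => c.insert u (some (pvHamA x0 u))) PySem.Dict.empty
    pvMinVals (rest.foldl (pvStepA adj) cost0).values

-- ===== PORT B =====
-- sum(a != b for a, b in zip(x, v))  (True counts 1)
def pvHamB (x v : String) : Int :=
  (List.zip x.toList v.toList).foldl (fun s ab => if ab.1 ≠ ab.2 then s + 1 else s) 0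

-- the one loop over edges building succ (setdefault+append) and the node set together
def pvSuccNodes (edges : List (String × String)) :
    PySem.Dict String (List String) × PySem.Set String :=
  edges.foldl (fun p uv =>
      (p.1.insert uv.1 (p.1.getD uv.1 [] ++ [uv.2]),
       PySem.Set.add (PySem.Set.add p.2 uv.1) uv.2))
    (PySem.Dict.empty, PySem.Set.empty)

-- min((best[w] for w in ws), default=inf); every w in ws is a key of best, so getD is exact
def pvMinSucc (best : PySem.Dict String (Option Int)) (ws : List String) : Option Int :=
  (ws.map (fun w => best.getD w none)).foldl pvOmin none

-- one iteration of B's loop: best = {v: ham(x, v) + min(..., default=inf) for v in nodes}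
def pvStepB (succ : PySem.Dict String (List String)) (nodes : List String)
    (best : PySem.Dict String (Option Int)) (x : String) : PySem.Dict String (Option Int) :=
  nodes.foldl (fun d v => d.insert v (pvAddO (pvHamB x v) (pvMinSucc best (succ.getD v []))))
    PySem.Dict.empty

def solve_alt (itinerary : List String) (edges : List (String × String)) : Int :=
  let sn := pvSuccNodes edges
  match PySem.List.pyGet? itinerary (-1) with
  | none => 0  -- itinerary[-1] raises IndexError (outside Pre_solve)
  | some xl =>
    let best0 : PySem.Dict String (Option Int) :=
      sn.2.foldl (fun d v => d.insert v (some (pvHamB xl v))) PySem.Dict.empty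
    let bestF := ((PySem.List.slice itinerary none (some (-1))).reverse).foldl
      (pvStepB sn.1 sn.2) best0
    -- min(best[u] for u in succ): every u in succ is a node, hence a key of best
    pvMinVals (sn.1.keys.map (fun u => bestF.getD u none))

-- ===== PRECONDITION & SPEC =====
-- nodes reachable in one edge-step from S
def pvReachStep (edges : List (String × String)) (S : List String) : List String :=
  PySem.List.dedup ((edges.filter (fun e => e.1 ∈ S)).map Prod.snd)

def pvReachN : Nat → List (String × String) → List String → List String
  | 0, _, S => S
  | n + 1, edges, S => pvReachN n edges (pvReachStep edges S)

-- Pre_ excludes inputs on which A raises (empty itinerary: IndexError on itinerary[0];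
-- empty edges: ValueError from min() of an empty dict) and inputs with no walk of
-- len(itinerary)-1 edges starting at an edge source, on which A returns float('inf'),
-- which is not a value of the declared int type.
def Pre_solve (itinerary : List String) (edges : List (String × String)) : Prop :=
  itinerary ≠ [] ∧ edges ≠ [] ∧
    pvReachN (itinerary.length - 1) edges (PySem.List.dedup (edges.map Prod.fst)) ≠ []

instance (itinerary : List String) (edges : List (String × String)) : Decidable (Pre_solve itinerary edges) := by
  unfold Pre_solve; infer_instance

def pvWitness_solve : List String × (List (String × String)) := (["ab", "cb"], [("ab", "ab")])

def Spec_solve (itinerary : List String) (edges : List (String × String)) (out : Int) : Prop := out = solve_alt itinerary edges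
instance (itinerary : List String) (edges : List (String × String)) (out : Int) : Decidable (Spec_solve itinerary edges out) := by unfold Spec_solve; infer_instance

-- ===== CLAIM (what is proved, stated in full; the proofs are below) =====
def Claim_equal_solve : Prop := ∀ (itinerary : List String) (edges : List (String × String)), Dom_solve itinerary edges → Pre_solve itinerary edges → Spec_solve itinerary edges (solve itinerary edges)

-- ===== LEMMAS AND PROOFS =====

-- ---- pvOmin / pvOplus algebra ----
theorem pvOmin_none_right (a : Option Int) : pvOmin a none = a := by
  cases a <;> rfl

theorem pvOmin_right_comm (z x y : Option Int) :
    pvOmin (pvOmin z x) y = pvOmin (pvOmin z y) x := by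
  cases z <;> cases x <;> cases y <;> simp [pvOmin, Int.min_def] <;> split_ifs <;> omega

theorem pvOmin_assoc (a b c : Option Int) :
    pvOmin (pvOmin a b) c = pvOmin a (pvOmin b c) := by
  cases a <;> cases b <;> cases c <;> simp [pvOmin, Int.min_def] <;> split_ifs <;> omega

-- proof-side addition on Option Int (none = inf absorbs); pvOadd/pvAddO are its two halves
def pvOplus : Option Int → Option Int → Option Int
  | none, _ => none
  | _, none => none
  | some a, some b => some (a + b)

theorem pvOadd_eq_pvOplus (a : Option Int) (d : Int) : pvOadd a d = pvOplus a (some d) := by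
  cases a <;> rfl

theorem pvAddO_eq_pvOplus (d : Int) (o : Option Int) : pvAddO d o = pvOplus (some d) o := by
  cases o <;> rfl

theorem pvOplus_none_right (a : Option Int) : pvOplus a none = none := by
  cases a <;> rfl

theorem pvOplus_some_zero (a : Option Int) : pvOplus a (some 0) = a := by
  cases a <;> simp [pvOplus]

theorem pvOplus_assoc (a b c : Option Int) :
    pvOplus (pvOplus a b) c = pvOplus a (pvOplus b c) := by
  cases a <;> cases b <;> cases c <;> simp [pvOplus] ; ring

theorem pvOplus_min_left (a b c : Option Int) :
    pvOplus a (pvOmin b c) = pvOmin (pvOplus a b) (pvOplus a c) := by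
  cases a <;> cases b <;> cases c <;> simp [pvOplus, pvOmin, Int.min_def] <;> split_ifs <;> omega

theorem pvOplus_min_right (a b c : Option Int) :
    pvOplus (pvOmin a b) c = pvOmin (pvOplus a c) (pvOplus b c) := by
  cases a <;> cases b <;> cases c <;> simp [pvOplus, pvOmin, Int.min_def] <;> split_ifs <;> omega

theorem pvHamB_eq_pvHamA (x u : String) : pvHamB x u = pvHamA x u := by
  unfold pvHamA pvHamB
  congr 1
  funext s ab
  split <;> omega

-- ---- pvBigMin: fold of pvOmin over the images of a list ----
def pvBigMin {α : Type} (l : List α) (f : α → Option Int) : Option Int :=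
  (l.map f).foldl pvOmin none

theorem pv_foldl_pvOmin_acc : ∀ (l : List (Option Int)) (a : Option Int),
    l.foldl pvOmin a = pvOmin a (l.foldl pvOmin none) := by
  intro l
  induction l with
  | nil => intro a; rw [List.foldl_nil, List.foldl_nil, pvOmin_none_right]
  | cons x l ih =>
    intro a
    rw [List.foldl_cons, List.foldl_cons, ih (pvOmin a x), ih (pvOmin none x)]
    show pvOmin (pvOmin a x) _ = pvOmin a (pvOmin (pvOmin none x) _)
    rw [pvOmin_assoc]
    rfl

theorem pvBigMin_nil {α : Type} (f : α → Option Int) : pvBigMin [] f = none := rfl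

theorem pvBigMin_cons {α : Type} (x : α) (l : List α) (f : α → Option Int) :
    pvBigMin (x :: l) f = pvOmin (f x) (pvBigMin l f) := by
  unfold pvBigMin
  rw [List.map_cons, List.foldl_cons, pv_foldl_pvOmin_acc]
  rfl

theorem pvBigMin_append {α : Type} (l1 l2 : List α) (f : α → Option Int) :
    pvBigMin (l1 ++ l2) f = pvOmin (pvBigMin l1 f) (pvBigMin l2 f) := by
  unfold pvBigMin
  rw [List.map_append, List.foldl_append, pv_foldl_pvOmin_acc]

theorem pvBigMin_map {α β : Type} (l : List α) (h : α → β) (f : β → Option Int) :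
    pvBigMin (l.map h) f = pvBigMin l (fun a => f (h a)) := by
  unfold pvBigMin
  rw [List.map_map]
  rfl

theorem pvBigMin_flatMap {α β : Type} (l : List α) (h : α → List β) (f : β → Option Int) :
    pvBigMin (l.flatMap h) f = pvBigMin l (fun a => pvBigMin (h a) f) := by
  induction l with
  | nil => rfl
  | cons a l ih =>
    rw [List.flatMap_cons, pvBigMin_append, pvBigMin_cons, ih]

theorem pvBigMin_perm {α : Type} {l1 l2 : List α} (h : l1.Perm l2) (f : α → Option Int) :
    pvBigMin l1 f = pvBigMin l2 f :=
  (h.map f).foldl_eq' (fun a _ b _ z => pvOmin_right_comm z a b) none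

theorem pvBigMin_congr {α : Type} {l : List α} {f g : α → Option Int}
    (h : ∀ x ∈ l, f x = g x) : pvBigMin l f = pvBigMin l g := by
  unfold pvBigMin
  rw [List.map_congr_left h]

theorem pvOplus_bigMin_left {α : Type} (a : Option Int) (l : List α) (f : α → Option Int) :
    pvOplus a (pvBigMin l f) = pvBigMin l (fun x => pvOplus a (f x)) := by
  induction l with
  | nil => rw [pvBigMin_nil, pvBigMin_nil, pvOplus_none_right]
  | cons x l ih => rw [pvBigMin_cons, pvBigMin_cons, pvOplus_min_left, ih]

theorem pvBigMin_oplus_right {α : Type} (l : List α) (f : α → Option Int) (c : Option Int) :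
    pvOplus (pvBigMin l f) c = pvBigMin l (fun x => pvOplus (f x) c) := by
  induction l with
  | nil => rw [pvBigMin_nil, pvBigMin_nil]; rfl
  | cons x l ih => rw [pvBigMin_cons, pvBigMin_cons, pvOplus_min_right, ih]

theorem pvBigMin_ne_none {α : Type} {l : List α} {f : α → Option Int}
    (h : pvBigMin l f ≠ none) : ∃ x ∈ l, f x ≠ none := by
  induction l with
  | nil => exact absurd rfl h
  | cons x l ih =>
    rw [pvBigMin_cons] at h
    by_cases hx : f x = none
    · rw [hx] at h
      obtain ⟨y, hy, hfy⟩ := ih h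
      exact ⟨y, List.mem_cons_of_mem _ hy, hfy⟩
    · exact ⟨x, List.mem_cons_self, hx⟩

theorem pv_bigMin_filter_isSome {α : Type} (l : List α) (f : α → Option Int) :
    pvBigMin l f = pvBigMin (l.filter (fun v => (f v).isSome)) f := by
  induction l with
  | nil => rfl
  | cons x l ih =>
    rw [pvBigMin_cons, List.filter_cons]
    by_cases hx : (f x).isSome
    · rw [if_pos hx, pvBigMin_cons, ih]
    · have hnone : f x = none := Option.not_isSome_iff_eq_none.mp hx
      rw [if_neg hx, hnone, ih]
      rfl

-- two nodup index lists that agree on the support of f give the same min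
theorem pvBigMin_eq_of_support {l1 l2 : List String} (f : String → Option Int)
    (h1 : l1.Nodup) (h2 : l2.Nodup)
    (h : ∀ v, f v ≠ none → (v ∈ l1 ↔ v ∈ l2)) : pvBigMin l1 f = pvBigMin l2 f := by
  rw [pv_bigMin_filter_isSome l1 f, pv_bigMin_filter_isSome l2 f]
  apply pvBigMin_perm
  rw [List.perm_ext_iff_of_nodup (h1.filter _) (h2.filter _)]
  intro v
  simp only [List.mem_filter, Option.isSome_iff_ne_none]
  constructor
  · rintro ⟨hv1, hv⟩; exact ⟨(h v hv).mp hv1, hv⟩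
  · rintro ⟨hv2, hv⟩; exact ⟨(h v hv).mpr hv2, hv⟩

-- ---- generic fold helpers ----
theorem pv_foldl_preserves {σ α : Type} {P : σ → Prop} (f : σ → α → σ)
    (h : ∀ s a, P s → P (f s a)) :
    ∀ (l : List α) (s : σ), P s → P (l.foldl f s) := by
  intro l
  induction l with
  | nil => intro s hs; exact hs
  | cons a l ih => intro s hs; exact ih _ (h s a hs)

-- a relaxation pass over a list of pairs, seen through its getD function
theorem pv_foldPairs_getD {σ : Type} (step : σ → String × String → σ)
    (proj : σ → PySem.Dict String (Option Int)) (cand : String × String → Option Int)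
    (P : σ → Prop)
    (hP : ∀ s uv, P s → P (step s uv))
    (h : ∀ s uv v, P s → (proj (step s uv)).getD v none =
        if uv.2 = v then pvOmin ((proj s).getD v none) (cand uv) else (proj s).getD v none) :
    ∀ (ps : List (String × String)) (s : σ) (v : String), P s →
      (proj (ps.foldl step s)).getD v none =
        ((ps.filter (fun uv => uv.2 = v)).map cand).foldl pvOmin ((proj s).getD v none) := by
  intro ps
  induction ps with
  | nil => intro s v _; rfl
  | cons uv ps ih =>
    intro s v hs
    by_cases hv : uv.2 = v
    · rw [List.foldl_cons, ih _ _ (hP s uv hs), h s uv v hs, if_pos hv]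
      simp [hv]
    · rw [List.foldl_cons, ih _ _ (hP s uv hs), h s uv v hs, if_neg hv]
      simp [hv]

-- ---- A's adjacency dict, characterised ----
theorem pvAdjA_getD_aux (edges : List (String × String)) :
    ∀ (d : PySem.Dict String (List String)) (u : String),
      (edges.foldl (fun d uv => d.insert uv.1 (d.getD uv.1 [] ++ [uv.2])) d).getD u [] =
        d.getD u [] ++ (edges.filter (fun e => e.1 = u)).map Prod.snd := by
  induction edges with
  | nil => intro d u; simp
  | cons e es ih =>
    intro d u
    rw [List.foldl_cons, ih, List.filter_cons]
    by_cases hu : e.1 = u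
    · simp [hu]
    · simp [hu, PySem.Dict.getD_insert, Ne.symm hu]

theorem pvAdjA_getD (edges : List (String × String)) (u : String) :
    (pvAdjA edges).getD u [] = (edges.filter (fun e => e.1 = u)).map Prod.snd := by
  unfold pvAdjA
  rw [pvAdjA_getD_aux]
  simp [PySem.Dict.getD_empty]

theorem pvAdjA_keys (edges : List (String × String)) :
    (pvAdjA edges).keys = PySem.Set.ofList (edges.map Prod.fst) := by
  unfold pvAdjA
  rw [PySem.Dict.keys_foldl_insert_key (key := Prod.fst)
    (f := fun d uv => d.getD uv.1 [] ++ [uv.2])]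
  simp [PySem.Dict.keys_empty, PySem.Set.update_nil_left]

theorem pvAdjA_keys_nodup (edges : List (String × String)) : (pvAdjA edges).keys.Nodup := by
  rw [pvAdjA_keys]; exact PySem.Set.nodup_ofList _

theorem pvAdjA_keys_mem (edges : List (String × String)) (u : String) :
    u ∈ (pvAdjA edges).keys ↔ u ∈ edges.map Prod.fst := by
  rw [pvAdjA_keys]; exact PySem.Set.mem_ofList (xs := edges.map Prod.fst) (y := u)

-- ---- A's nested relax loop = a flat fold over the grouped pair list ----
def pvFlat (adj : PySem.Dict String (List String)) : List (String × String) :=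
  adj.keys.flatMap (fun u => (adj.getD u []).map (fun v => (u, v)))

theorem pvStepA_eq_flat (adj : PySem.Dict String (List String))
    (cost : PySem.Dict String (Option Int)) (x : String) :
    pvStepA adj cost x = (pvFlat adj).foldl
      (fun nc uv => nc.insert uv.2 (pvOmin (nc.getD uv.2 none)
        (pvOadd (cost.getD uv.1 none) (pvHamA x uv.2)))) PySem.Dict.empty := by
  unfold pvStepA pvFlat
  generalize (PySem.Dict.empty : PySem.Dict String (Option Int)) = nc
  induction adj.keys generalizing nc with
  | nil => rfl
  | cons u ks ih =>
    rw [List.foldl_cons, List.flatMap_cons, List.foldl_append, ih, List.foldl_map]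

-- grouping by a complete list of distinct key values is a permutation of the original list
theorem pv_perm_flatMap_filter {β : Type} (key : β → String) :
    ∀ (ks : List String) (es : List β), ks.Nodup → (∀ e ∈ es, key e ∈ ks) →
      List.Perm (ks.flatMap fun u => es.filter (fun e => key e = u)) es := by
  intro ks
  induction ks with
  | nil =>
    intro es _ hall
    cases es with
    | nil => rfl
    | cons e es => exact absurd (hall e (by simp)) (by simp)
  | cons k ks ih =>
    intro es hnd hall
    rw [List.flatMap_cons]
    have hk : k ∉ ks := (List.nodup_cons.mp hnd).1
    have hcongr : ∀ u ∈ ks, es.filter (fun e => key e = u) =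
        (es.filter (fun e => ¬ key e = k)).filter (fun e => key e = u) := by
      intro u hu
      rw [List.filter_filter]
      apply List.filter_congr
      intro e _
      by_cases h1 : key e = u
      · have h2 : ¬ key e = k := by rw [h1]; intro hc; exact hk (hc ▸ hu)
        have h3 : u ≠ k := fun hek => hk (hek ▸ hu)
        simp [h1, h3]
      · simp [h1]
    rw [List.flatMap_congr hcongr]
    have hperm := ih (es.filter (fun e => ¬ key e = k)) (List.nodup_cons.mp hnd).2 ?side
    case side =>
      intro e he
      rcases List.mem_filter.mp he with ⟨hmem, hne⟩
      rcases List.mem_cons.mp (hall e hmem) with h | h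
      · exact absurd h (by simpa using hne)
      · exact h
    have h2 := List.Perm.append_left (es.filter (fun e => key e = k)) hperm
    refine h2.trans ?_
    have h3 := List.filter_append_perm (fun e => decide (key e = k)) es
    simpa using h3

theorem pvFlat_adjA_perm (edges : List (String × String)) : List.Perm (pvFlat (pvAdjA edges)) edges := by
  unfold pvFlat
  have h1 : ∀ u ∈ (pvAdjA edges).keys,
      ((pvAdjA edges).getD u []).map (fun v => (u, v)) = edges.filter (fun e => e.1 = u) := by
    intro u _
    rw [pvAdjA_getD, List.map_map]
    have : ∀ e ∈ edges.filter (fun e => e.1 = u), ((fun v => (u, v)) ∘ Prod.snd) e = id e := by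
      intro e he
      have he1 : e.1 = u := by simpa using (List.mem_filter.mp he).2
      simp [Function.comp, ← he1]
    rw [List.map_congr_left this, List.map_id]
  rw [List.flatMap_congr h1]
  exact pv_perm_flatMap_filter Prod.fst _ edges (pvAdjA_keys_nodup edges)
    (fun e he => (pvAdjA_keys_mem edges e.1).mpr (List.mem_map_of_mem he))

-- ---- the getD function computed by one A step ----
theorem pvStepA_getD (edges : List (String × String)) (cost : PySem.Dict String (Option Int))
    (x v : String) :
    (pvStepA (pvAdjA edges) cost x).getD v none =
      pvBigMin (edges.filter (fun uv => uv.2 = v))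
        (fun uv => pvOadd (cost.getD uv.1 none) (pvHamA x uv.2)) := by
  rw [pvStepA_eq_flat]
  have h := pv_foldPairs_getD
    (fun nc uv => nc.insert uv.2 (pvOmin (nc.getD uv.2 none)
      (pvOadd (cost.getD uv.1 none) (pvHamA x uv.2))))
    id (fun uv => pvOadd (cost.getD uv.1 none) (pvHamA x uv.2)) (fun _ => True)
    (fun _ _ _ => trivial) ?hstep (pvFlat (pvAdjA edges)) PySem.Dict.empty v trivial
  case hstep =>
    intro s uv w _
    simp only [id]
    rw [PySem.Dict.getD_insert]
    by_cases hw : uv.2 = w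
    · simp [hw]
    · simp [hw, Ne.symm hw]
  simp only [id_eq] at h
  rw [h, show (PySem.Dict.empty : PySem.Dict String (Option Int)).getD v none = none from rfl]
  exact ((pvFlat_adjA_perm edges).filter _ |>.map _).foldl_eq'
    (fun a _ b _ z => pvOmin_right_comm z a b) none

theorem pvStepA_nodup (adj : PySem.Dict String (List String))
    (cost : PySem.Dict String (Option Int)) (x : String) :
    (pvStepA adj cost x).keys.Nodup := by
  unfold pvStepA
  apply pv_foldl_preserves (P := fun d : PySem.Dict String (Option Int) => d.keys.Nodup)
  · intro d u hd
    apply pv_foldl_preserves (P := fun d : PySem.Dict String (Option Int) => d.keys.Nodup)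
    · intro d v hdv; exact PySem.Dict.nodup_keys_insert _ _ _ hdv
    · exact hd
  · exact PySem.Dict.nodup_keys_empty

-- ---- comprehension-style insert folds, seen through getD ----
theorem pv_foldl_insert_getD (g : String → Option Int) :
    ∀ (l : List String) (c : PySem.Dict String (Option Int)) (v : String),
      (l.foldl (fun c u => c.insert u (g u)) c).getD v none =
        if v ∈ l then g v else c.getD v none := by
  intro l
  induction l with
  | nil => intro c v; simp
  | cons u l ih =>
    intro c v
    rw [List.foldl_cons, ih]
    by_cases hv : v ∈ l
    · simp [hv]
    · rw [if_neg hv, PySem.Dict.getD_insert]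
      by_cases hu : v = u
      · simp [hu]
      · simp [hu, hv]

theorem pv_cost0A_getD (edges : List (String × String)) (x0 v : String) :
    ((pvAdjA edges).keys.foldl (fun c u => c.insert u (some (pvHamA x0 u)))
        PySem.Dict.empty).getD v none =
      if v ∈ edges.map Prod.fst then some (pvHamA x0 v) else none := by
  rw [pv_foldl_insert_getD (fun u => some (pvHamA x0 u))]
  rw [PySem.Dict.getD_empty]
  by_cases hv : v ∈ edges.map Prod.fst
  · simp [hv, (pvAdjA_keys_mem edges v).mpr hv]
  · have hnk : v ∉ (pvAdjA edges).keys := fun h => hv ((pvAdjA_keys_mem edges v).mp h)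
    simp [hv, hnk]

theorem pv_cost0A_nodup (edges : List (String × String)) (x0 : String) :
    ((pvAdjA edges).keys.foldl (fun c u => c.insert u (some (pvHamA x0 u)))
      PySem.Dict.empty).keys.Nodup := by
  apply pv_foldl_preserves (P := fun d : PySem.Dict String (Option Int) => d.keys.Nodup)
  · intro d u hd; exact PySem.Dict.nodup_keys_insert _ _ _ hd
  · exact PySem.Dict.nodup_keys_empty

-- ---- B's succ/nodes pair, characterised ----
def pvNodes (edges : List (String × String)) : PySem.Set String :=
  edges.foldl (fun s uv => PySem.Set.add (PySem.Set.add s uv.1) uv.2) PySem.Set.empty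

-- the one B loop with two independent accumulators is A's adjacency fold paired with the node-set fold
theorem pvSuccNodes_eq (edges : List (String × String)) :
    pvSuccNodes edges = (pvAdjA edges, pvNodes edges) :=
  PySem.List.foldl_prod_mk
    (fun (d : PySem.Dict String (List String)) (uv : String × String) =>
      d.insert uv.1 (d.getD uv.1 [] ++ [uv.2]))
    (fun (s : PySem.Set String) (uv : String × String) =>
      PySem.Set.add (PySem.Set.add s uv.1) uv.2)
    edges PySem.Dict.empty PySem.Set.empty

theorem pvNodes_nodup (edges : List (String × String)) : (pvNodes edges).Nodup := by
  unfold pvNodes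
  apply pv_foldl_preserves (P := fun s : PySem.Set String => s.Nodup)
  · intro s uv hs; exact PySem.Set.nodup_add _ _ (PySem.Set.nodup_add _ _ hs)
  · exact List.nodup_nil

theorem pvNodes_mem_aux (edges : List (String × String)) :
    ∀ (s : PySem.Set String) (v : String),
      (v ∈ edges.foldl (fun s uv => PySem.Set.add (PySem.Set.add s uv.1) uv.2) s) ↔
        (v ∈ s ∨ v ∈ edges.map Prod.fst ∨ v ∈ edges.map Prod.snd) := by
  induction edges with
  | nil => intro s v; simp
  | cons e es ih =>
    intro s v
    rw [List.foldl_cons, ih]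
    simp only [PySem.Set.mem_add, List.map_cons, List.mem_cons]
    tauto

theorem pvNodes_mem (edges : List (String × String)) (v : String) :
    v ∈ pvNodes edges ↔ v ∈ edges.map Prod.fst ∨ v ∈ edges.map Prod.snd := by
  unfold pvNodes
  rw [pvNodes_mem_aux]
  simp [PySem.Set.empty]

-- ===== the pure layer: forward values, tail values =====
def pvF0 (edges : List (String × String)) (x0 : String) : String → Option Int :=
  fun v => if v ∈ edges.map Prod.fst then some (pvHamA x0 v) else none

def pvStepF (edges : List (String × String)) (f : String → Option Int) (x : String) :
    String → Option Int :=
  fun v => pvBigMin (edges.filter (fun e => e.2 = v))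
    (fun e => pvOadd (f e.1) (pvHamA x e.2))

def pvFwd (edges : List (String × String)) (x0 : String) (p : List String) :
    String → Option Int :=
  p.foldl (pvStepF edges) (pvF0 edges x0)

def pvTail (edges : List (String × String)) : List String → String → Option Int
  | [], _ => some 0
  | x :: s, v => pvBigMin ((edges.filter (fun e => e.1 = v)).map Prod.snd)
      (fun w => pvOplus (some (pvHamA x w)) (pvTail edges s w))

-- value of B's best dict for a (nonempty) remaining itinerary suffix
def pvValF (edges : List (String × String)) (nodes : List String) :
    List String → String → Option Int
  | [], _ => none
  | z :: t, v => if v ∈ nodes then pvOplus (some (pvHamA z v)) (pvTail edges t v) else none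

-- ---- A's dict loop computes pvFwd ----
theorem pvAdict_getD (edges : List (String × String)) :
    ∀ (p : List String) (cost : PySem.Dict String (Option Int)) (f : String → Option Int),
      (∀ v, cost.getD v none = f v) →
      ∀ v, (p.foldl (pvStepA (pvAdjA edges)) cost).getD v none =
        (p.foldl (pvStepF edges) f) v := by
  intro p
  induction p with
  | nil => intro cost f h v; exact h v
  | cons x p ih =>
    intro cost f h v
    rw [List.foldl_cons, List.foldl_cons]
    apply ih
    intro w
    rw [pvStepA_getD]
    unfold pvStepF
    apply pvBigMin_congr
    intro e _
    rw [h e.1]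

theorem pvAfold_nodup (edges : List (String × String)) (x0 : String) (p : List String) :
    ((p.foldl (pvStepA (pvAdjA edges))
      ((pvAdjA edges).keys.foldl (fun c u => c.insert u (some (pvHamA x0 u)))
        PySem.Dict.empty))).keys.Nodup := by
  apply pv_foldl_preserves (P := fun d : PySem.Dict String (Option Int) => d.keys.Nodup)
  · intro d x _; exact pvStepA_nodup _ _ _
  · exact pv_cost0A_nodup edges x0

-- support of the forward values lies inside the node set
theorem pvFwd_support (edges : List (String × String)) (x0 : String) (p : List String) :
    ∀ v, pvFwd edges x0 p v ≠ none → v ∈ pvNodes edges := by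
  induction p using List.reverseRecOn with
  | nil =>
    intro v h
    unfold pvFwd pvF0 at h
    rw [List.foldl_nil] at h
    by_cases hv : v ∈ edges.map Prod.fst
    · exact (pvNodes_mem edges v).mpr (Or.inl hv)
    · rw [if_neg hv] at h; exact absurd rfl h
  | append_singleton p x ih =>
    intro v h
    unfold pvFwd at h
    rw [List.foldl_append, List.foldl_cons, List.foldl_nil] at h
    obtain ⟨e, he, _⟩ := pvBigMin_ne_none h
    rcases List.mem_filter.mp he with ⟨hmem, hv⟩
    have : e.2 = v := by simpa using hv
    exact (pvNodes_mem edges v).mpr (Or.inr (this ▸ List.mem_map_of_mem hmem))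

-- ---- B's dict loop computes pvValF ----
theorem pvStepB_getD (edges : List (String × String)) (x : String)
    (best : PySem.Dict String (Option Int)) (y : String) (s : List String)
    (hbest : ∀ v, best.getD v none = pvValF edges (pvNodes edges) (y :: s) v) :
    ∀ v, (pvStepB (pvAdjA edges) (pvNodes edges) best x).getD v none =
      pvValF edges (pvNodes edges) (x :: y :: s) v := by
  intro v
  unfold pvStepB
  rw [pv_foldl_insert_getD (fun v => pvAddO (pvHamB x v) (pvMinSucc best ((pvAdjA edges).getD v [])))]
  rw [PySem.Dict.getD_empty]
  simp only [pvValF]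
  by_cases hv : v ∈ pvNodes edges
  · rw [if_pos hv, if_pos hv]
    rw [pvAddO_eq_pvOplus, pvHamB_eq_pvHamA]
    congr 1
    show pvMinSucc best ((pvAdjA edges).getD v []) = pvTail edges (y :: s) v
    rw [pvAdjA_getD]
    show pvBigMin (((edges.filter (fun e => e.1 = v)).map Prod.snd))
        (fun w => best.getD w none) = _
    unfold pvTail
    apply pvBigMin_congr
    intro w hw
    rw [hbest w]
    simp only [pvValF]
    rcases List.mem_map.mp hw with ⟨e, he, hew⟩
    have hwn : w ∈ pvNodes edges :=
      (pvNodes_mem edges w).mpr (Or.inr (hew ▸ List.mem_map_of_mem (List.mem_of_mem_filter he)))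
    rw [if_pos hwn]
  · rw [if_neg hv, if_neg hv]

theorem pvBloop_getD (edges : List (String × String)) :
    ∀ (L : List String) (y : String) (s : List String) (best : PySem.Dict String (Option Int)),
      (∀ v, best.getD v none = pvValF edges (pvNodes edges) (y :: s) v) →
      ∀ v, (L.foldl (pvStepB (pvAdjA edges) (pvNodes edges)) best).getD v none =
        pvValF edges (pvNodes edges) (L.reverse ++ y :: s) v := by
  intro L
  induction L with
  | nil => intro y s best h v; exact h v
  | cons x L ih =>
    intro y s best h v
    rw [List.foldl_cons]
    have hx := pvStepB_getD edges x best y s h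
    have := ih x (y :: s) _ hx v
    rw [this]
    simp [List.append_assoc]

-- B's initial comprehension is pvValF for the one-element suffix
theorem pvBinit_getD (edges : List (String × String)) (xl : String) :
    ∀ v, ((pvNodes edges).foldl (fun d v => d.insert v (some (pvHamB xl v)))
        PySem.Dict.empty).getD v none = pvValF edges (pvNodes edges) [xl] v := by
  intro v
  rw [pv_foldl_insert_getD (fun v => some (pvHamB xl v)), PySem.Dict.getD_empty]
  simp only [pvValF, pvTail]
  by_cases hv : v ∈ pvNodes edges
  · rw [if_pos hv, if_pos hv, pvOplus_some_zero, pvHamB_eq_pvHamA]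
  · rw [if_neg hv, if_neg hv]

-- ---- the exchange: one backward step absorbs one forward step ----
theorem pvExchange (edges : List (String × String)) (f : String → Option Int)
    (x : String) (s : List String) :
    pvBigMin (pvNodes edges) (fun v => pvOplus (f v) (pvTail edges (x :: s) v)) =
      pvBigMin (pvNodes edges) (fun w => pvOplus (pvStepF edges f x w) (pvTail edges s w)) := by
  have hL : pvBigMin (pvNodes edges) (fun v => pvOplus (f v) (pvTail edges (x :: s) v)) =
      pvBigMin edges (fun e => pvOplus (f e.1)
        (pvOplus (some (pvHamA x e.2)) (pvTail edges s e.2))) := by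
    have h1 : ∀ v ∈ pvNodes edges,
        pvOplus (f v) (pvTail edges (x :: s) v) =
          pvBigMin (edges.filter (fun e => e.1 = v))
            (fun e => pvOplus (f e.1) (pvOplus (some (pvHamA x e.2)) (pvTail edges s e.2))) := by
      intro v _
      show pvOplus (f v) (pvBigMin ((edges.filter (fun e => e.1 = v)).map Prod.snd)
        (fun w => pvOplus (some (pvHamA x w)) (pvTail edges s w))) = _
      rw [pvBigMin_map, pvOplus_bigMin_left]
      apply pvBigMin_congr
      intro e he
      have he1 : e.1 = v := by simpa using (List.mem_filter.mp he).2
      rw [he1]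
    rw [pvBigMin_congr h1, ← pvBigMin_flatMap]
    apply pvBigMin_perm
    exact pv_perm_flatMap_filter Prod.fst (pvNodes edges) edges (pvNodes_nodup edges)
      (fun e he => (pvNodes_mem edges e.1).mpr (Or.inl (List.mem_map_of_mem he)))
  have hR : pvBigMin (pvNodes edges) (fun w => pvOplus (pvStepF edges f x w) (pvTail edges s w)) =
      pvBigMin edges (fun e => pvOplus (f e.1)
        (pvOplus (some (pvHamA x e.2)) (pvTail edges s e.2))) := by
    have h1 : ∀ w ∈ pvNodes edges,
        pvOplus (pvStepF edges f x w) (pvTail edges s w) =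
          pvBigMin (edges.filter (fun e => e.2 = w))
            (fun e => pvOplus (f e.1) (pvOplus (some (pvHamA x e.2)) (pvTail edges s e.2))) := by
      intro w _
      unfold pvStepF
      rw [pvBigMin_oplus_right]
      apply pvBigMin_congr
      intro e he
      have he2 : e.2 = w := by simpa using (List.mem_filter.mp he).2
      rw [pvOadd_eq_pvOplus, pvOplus_assoc, he2]
    rw [pvBigMin_congr h1, ← pvBigMin_flatMap]
    apply pvBigMin_perm
    exact pv_perm_flatMap_filter Prod.snd (pvNodes edges) edges (pvNodes_nodup edges)
      (fun e he => (pvNodes_mem edges e.2).mpr (Or.inr (List.mem_map_of_mem he)))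
  rw [hL, hR]

-- chaining the exchange over the whole itinerary
theorem pvChain (edges : List (String × String)) (x0 : String) :
    ∀ (s p : List String),
      pvBigMin (pvNodes edges) (fun v => pvOplus (pvFwd edges x0 p v) (pvTail edges s v)) =
        pvBigMin (pvNodes edges) (fun v => pvOplus (pvFwd edges x0 (p ++ s) v) (some 0)) := by
  intro s
  induction s with
  | nil =>
    intro p
    apply pvBigMin_congr
    intro v _
    rw [List.append_nil]
    rfl
  | cons x s ih =>
    intro p
    rw [pvExchange edges (pvFwd edges x0 p) x s]
    have hstep : ∀ w, pvStepF edges (pvFwd edges x0 p) x w = pvFwd edges x0 (p ++ [x]) w := by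
      intro w
      unfold pvFwd
      rw [List.foldl_append, List.foldl_cons, List.foldl_nil]
    have h1 : pvBigMin (pvNodes edges)
        (fun w => pvOplus (pvStepF edges (pvFwd edges x0 p) x w) (pvTail edges s w)) =
        pvBigMin (pvNodes edges)
        (fun w => pvOplus (pvFwd edges x0 (p ++ [x]) w) (pvTail edges s w)) := by
      apply pvBigMin_congr
      intro w _
      rw [hstep w]
    rw [h1, ih (p ++ [x])]
    apply pvBigMin_congr
    intro v _
    rw [List.append_assoc]
    rfl

-- ===== VERDICT (by name: the statement is the Claim_ definition above) =====
theorem solve_spec : Claim_equal_solve := by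
  intro itinerary edges _ _
  unfold Spec_solve
  cases itinerary with
  | nil => rfl
  | cons x0 rest =>
    -- unfold both ports to their Option-valued minima
    show pvMinVals _ = solve_alt (x0 :: rest) edges
    simp only [solve_alt, pvSuccNodes_eq]
    rw [show PySem.List.pyGet? (x0 :: rest) (-1) = ((x0 :: rest).getLast?) from
      PySem.List.pyGet?_neg_one _]
    rw [List.getLast?_eq_some_getLast (by simp)]
    simp only
    -- A's side: pvBigMin over the final dict's keys of pvFwd rest
    have hAdict := pvAdict_getD edges rest
      ((pvAdjA edges).keys.foldl (fun c u => c.insert u (some (pvHamA x0 u))) PySem.Dict.empty)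
      (pvF0 edges x0) (fun v => pv_cost0A_getD edges x0 v)
    set dA := rest.foldl (pvStepA (pvAdjA edges))
      ((pvAdjA edges).keys.foldl (fun c u => c.insert u (some (pvHamA x0 u))) PySem.Dict.empty)
    have hAnodup : dA.keys.Nodup := pvAfold_nodup edges x0 rest
    have hAval : dA.values = dA.keys.map (fun k => dA.getD k none) :=
      PySem.Dict.values_eq_map_keys dA hAnodup none
    have hA1 : dA.values.foldl pvOmin none = pvBigMin dA.keys (fun k => dA.getD k none) := by
      rw [hAval]; rfl
    have hA2 : pvBigMin dA.keys (fun k => dA.getD k none) =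
        pvBigMin dA.keys (pvFwd edges x0 rest) :=
      pvBigMin_congr (fun k _ => hAdict k)
    have hA3 : pvBigMin dA.keys (pvFwd edges x0 rest) =
        pvBigMin (pvNodes edges) (pvFwd edges x0 rest) := by
      apply pvBigMin_eq_of_support _ hAnodup (pvNodes_nodup edges)
      intro v hv
      constructor
      · intro _; exact pvFwd_support edges x0 rest v hv
      · intro _
        have hv2 : dA.getD v none ≠ none := by rw [hAdict v]; exact hv
        by_contra hk
        have hc : dA.contains v = false := by
          rcases Bool.eq_false_or_eq_true (dA.contains v) with h' | h'
          · exact absurd ((PySem.Dict.contains_iff_mem_keys dA v).mp h') hk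
          · exact h'
        rw [PySem.Dict.getD_of_not_contains _ _ hc] at hv2
        exact hv2 rfl
    -- B's side: pvBigMin over sources of pvValF itinerary
    have hB0 := pvBinit_getD edges ((x0 :: rest).getLast (by simp))
    have hBloop := pvBloop_getD edges (((x0 :: rest).dropLast).reverse)
      ((x0 :: rest).getLast (by simp)) []
      ((pvNodes edges).foldl (fun d v =>
        d.insert v (some (pvHamB ((x0 :: rest).getLast (by simp)) v))) PySem.Dict.empty)
      hB0
    rw [PySem.List.slice_to_neg_one]
    have hrw : (((x0 :: rest).dropLast).reverse).reverse ++
        [(x0 :: rest).getLast (by simp)] = x0 :: rest := by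
      rw [List.reverse_reverse]
      exact List.dropLast_append_getLast (by simp)
    rw [hrw] at hBloop
    -- the Option-valued B minimum
    have hBmin : ((pvAdjA edges).keys.map (fun u =>
        ((((x0 :: rest).dropLast).reverse).foldl (pvStepB (pvAdjA edges) (pvNodes edges))
          ((pvNodes edges).foldl (fun d v =>
            d.insert v (some (pvHamB ((x0 :: rest).getLast (by simp)) v)))
            PySem.Dict.empty)).getD u none)).foldl pvOmin none =
        pvBigMin (pvAdjA edges).keys (pvValF edges (pvNodes edges) (x0 :: rest)) := by
      show pvBigMin (pvAdjA edges).keys _ = _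
      exact pvBigMin_congr (fun u _ => hBloop u)
    -- rewrite B's pvValF over sources into pvOplus (pvF0) (pvTail rest)
    have hB2 : pvBigMin (pvAdjA edges).keys (pvValF edges (pvNodes edges) (x0 :: rest)) =
        pvBigMin (pvAdjA edges).keys
          (fun v => pvOplus (pvF0 edges x0 v) (pvTail edges rest v)) := by
      apply pvBigMin_congr
      intro u hu
      simp only [pvValF, pvF0]
      have hun : u ∈ pvNodes edges :=
        (pvNodes_mem edges u).mpr (Or.inl ((pvAdjA_keys_mem edges u).mp hu))
      rw [if_pos hun, if_pos ((pvAdjA_keys_mem edges u).mp hu)]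
    have hB3 : pvBigMin (pvAdjA edges).keys
        (fun v => pvOplus (pvF0 edges x0 v) (pvTail edges rest v)) =
        pvBigMin (pvNodes edges)
          (fun v => pvOplus (pvF0 edges x0 v) (pvTail edges rest v)) := by
      apply pvBigMin_eq_of_support _ (pvAdjA_keys_nodup edges) (pvNodes_nodup edges)
      intro v hv
      have hsrc : v ∈ edges.map Prod.fst := by
        by_contra hvs
        unfold pvF0 at hv
        rw [if_neg hvs] at hv
        exact hv rfl
      constructor
      · intro _; exact (pvNodes_mem edges v).mpr (Or.inl hsrc)
      · intro _; exact (pvAdjA_keys_mem edges v).mpr hsrc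
    -- connect via the chain
    have hchain := pvChain edges x0 rest []
    have hF0 : ∀ v, pvFwd edges x0 [] v = pvF0 edges x0 v := fun v => rfl
    have hchain' : pvBigMin (pvNodes edges)
        (fun v => pvOplus (pvF0 edges x0 v) (pvTail edges rest v)) =
        pvBigMin (pvNodes edges) (pvFwd edges x0 rest) := by
      have h1 : pvBigMin (pvNodes edges)
          (fun v => pvOplus (pvFwd edges x0 [] v) (pvTail edges rest v)) =
          pvBigMin (pvNodes edges)
          (fun v => pvOplus (pvF0 edges x0 v) (pvTail edges rest v)) :=
        pvBigMin_congr (fun v _ => by rw [hF0 v])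
      have h2 : pvBigMin (pvNodes edges)
          (fun v => pvOplus (pvFwd edges x0 ([] ++ rest) v) (some 0)) =
          pvBigMin (pvNodes edges) (pvFwd edges x0 rest) := by
        apply pvBigMin_congr
        intro v _
        rw [List.nil_append, pvOplus_some_zero]
      rw [← h1, hchain, h2]
    -- both pvMinVals arguments fold to the same Option
    unfold pvMinVals
    rw [hA1, hA2, hA3, ← hchain', ← hB3, ← hB2, ← hBmin]
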